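-- pv_equiv track=rewrite | github.com/dhruvguptax/clustered-subset-count | clustered_subset_count.py | is_clustered
-- ===== SOURCE A (Python) =====
-- def is_clustered(subset, d):
--     """
--     Check if a given subset is clustered with distance d.
--     A subset is clustered if every element has at least
--     one other element within distance <= d.
--     """
--     for i in range(len(subset)):
--         has_neighbor = any(
--             i != j and abs(subset[i] - subset[j]) <= d
--             for j in range(len(subset))
--         )
--         if not has_neighbor:
--             return False
--     return True
-- ===== SOURCE B (Python) =====
-- def is_clustered(subset, d):
--     """
--     Check if a given subset is clustered with distance d.
--     A subset is clustered if every element has at least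
--     one other element within distance <= d.
--     Sort once; an element's nearest other element is adjacent in sorted order.
--     """
--     s = sorted(subset)
--     n = len(s)
--     for i in range(n):
--         ok = (i > 0 and s[i] - s[i - 1] <= d) or (i + 1 < n and s[i + 1] - s[i] <= d)
--         if not ok:
--             return False
--     return True
-- ===== Notes on version B (the rewrite author's own statement) =====
-- stated objective: faster
-- what changed: Replaced the all-pairs neighbor scan with sort-then-adjacent-gap check: after sorting, an element has another element within d iff an adjacent element in sorted order is within d.
import Mathlib
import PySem

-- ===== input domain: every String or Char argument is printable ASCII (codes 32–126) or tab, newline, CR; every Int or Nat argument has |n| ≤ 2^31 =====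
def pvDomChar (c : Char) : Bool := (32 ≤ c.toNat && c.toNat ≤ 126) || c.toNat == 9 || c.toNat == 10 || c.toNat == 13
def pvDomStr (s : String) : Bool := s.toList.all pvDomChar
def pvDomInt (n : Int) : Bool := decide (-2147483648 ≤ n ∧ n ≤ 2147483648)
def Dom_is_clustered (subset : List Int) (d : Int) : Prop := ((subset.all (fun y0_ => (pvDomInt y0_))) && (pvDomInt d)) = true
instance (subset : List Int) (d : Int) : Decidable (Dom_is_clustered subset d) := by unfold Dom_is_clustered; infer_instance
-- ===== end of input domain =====

-- B replaces A's all-pairs neighbor scan by sorting once and checking only adjacent gaps (objective: faster).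

-- ===== PORT A =====
def is_clustered (subset : List Int) (d : Int) : Bool :=
  (PySem.List.pyRange 0 (PySem.List.len subset) 1).all (fun i =>
    (PySem.List.pyRange 0 (PySem.List.len subset) 1).any (fun j =>
      decide (i ≠ j) && decide (|PySem.List.pyGetD subset i 0 - PySem.List.pyGetD subset j 0| ≤ d)))

-- ===== PORT B =====
def is_clustered_alt (subset : List Int) (d : Int) : Bool :=
  let s := PySem.List.sorted subset (fun x => x) false
  let n : Int := PySem.List.len s
  (PySem.List.pyRange 0 n 1).all (fun i =>
    (decide (0 < i) && decide (PySem.List.pyGetD s i 0 - PySem.List.pyGetD s (i - 1) 0 ≤ d)) ||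
    (decide (i + 1 < n) && decide (PySem.List.pyGetD s (i + 1) 0 - PySem.List.pyGetD s i 0 ≤ d)))

-- ===== PRECONDITION & SPEC =====
def Spec_is_clustered (subset : List Int) (d : Int) (out : Bool) : Prop := out = is_clustered_alt subset d
instance (subset : List Int) (d : Int) (out : Bool) : Decidable (Spec_is_clustered subset d out) := by unfold Spec_is_clustered; infer_instance

-- ===== CLAIM (what is proved, stated in full; the proofs are below) =====
def Claim_equal_is_clustered : Prop := ∀ (subset : List Int) (d : Int), Dom_is_clustered subset d → Spec_is_clustered subset d (is_clustered subset d)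

-- ===== LEMMAS AND PROOFS =====

-- "every element has an element at another index within distance d"
def PIdx (xs : List Int) (d : Int) : Prop :=
  ∀ i, (hi : i < xs.length) → ∃ j, ∃ (hj : j < xs.length), j ≠ i ∧ |xs[i] - xs[j]| ≤ d

theorem pyGetD_nat (s : List Int) (m : Nat) (hm : m < s.length) :
    PySem.List.pyGetD s (m : Int) 0 = s[m]'hm := by
  rw [PySem.List.pyGetD_natCast]
  simp [List.getD_eq_getElem?_getD, List.getElem?_eq_getElem hm]

theorem portA_iff (xs : List Int) (d : Int) : is_clustered xs d = true ↔ PIdx xs d := by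
  have hA : is_clustered xs d = true ↔
      (∀ i < xs.length, ∃ j < xs.length, ¬ i = j ∧ |xs[i]?.getD 0 - xs[j]?.getD 0| ≤ d) := by
    unfold is_clustered
    rw [PySem.List.pyRange_one]
    simp [List.all_eq_true, List.any_eq_true]
  rw [hA]
  constructor
  · intro h i hi
    obtain ⟨j, hj, hne, hd⟩ := h i hi
    refine ⟨j, hj, fun e => hne (by omega), ?_⟩
    rwa [List.getElem?_eq_getElem hi, List.getElem?_eq_getElem hj] at hd
  · intro h i hi
    obtain ⟨j, hj, hne, hd⟩ := h i hi
    refine ⟨j, hj, fun e => hne (by omega), ?_⟩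
    rwa [List.getElem?_eq_getElem hi, List.getElem?_eq_getElem hj]

theorem pidx_iff_eraseIdx (xs : List Int) (d : Int) :
    PIdx xs d ↔ ∀ i, (hi : i < xs.length) → ∃ y ∈ xs.eraseIdx i, |xs[i] - y| ≤ d := by
  constructor
  · intro h i hi
    obtain ⟨j, hj, hne, hd⟩ := h i hi
    have hlen : (xs.eraseIdx i).length = xs.length - 1 := by
      rw [List.length_eraseIdx]; simp [hi]
    by_cases hji : j < i
    · refine ⟨xs[j], ?_, hd⟩
      have hj' : j < (xs.eraseIdx i).length := by omega
      have he := List.getElem_eraseIdx (l := xs) (i := i) hj'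
      rw [dif_pos hji] at he
      exact he ▸ List.getElem_mem hj'
    · have hij : i < j := by omega
      refine ⟨xs[j], ?_, hd⟩
      have hj' : j - 1 < (xs.eraseIdx i).length := by omega
      have he := List.getElem_eraseIdx (l := xs) (i := i) hj'
      rw [dif_neg (by omega)] at he
      have hidx : j - 1 + 1 = j := by omega
      simp only [hidx] at he
      exact he ▸ List.getElem_mem hj'
  · intro h i hi
    obtain ⟨y, hy, hd⟩ := h i hi
    obtain ⟨k, hk, hky⟩ := List.mem_iff_getElem.mp hy
    have hlen : (xs.eraseIdx i).length = xs.length - 1 := by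
      rw [List.length_eraseIdx]; simp [hi]
    by_cases hki : k < i
    · refine ⟨k, by omega, by omega, ?_⟩
      have he := List.getElem_eraseIdx (l := xs) (i := i) hk
      rw [dif_pos hki] at he
      rw [he.symm.trans hky]
      exact hd
    · refine ⟨k + 1, by omega, by omega, ?_⟩
      have he := List.getElem_eraseIdx (l := xs) (i := i) hk
      rw [dif_neg hki] at he
      rw [he.symm.trans hky]
      exact hd

theorem pidx_of_perm {xs ys : List Int} (h : xs.Perm ys) (d : Int) : PIdx xs d → PIdx ys d := by
  intro hp
  rw [pidx_iff_eraseIdx] at hp ⊢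
  intro i hi
  have hx : ys[i] ∈ xs := h.symm.subset (List.getElem_mem hi)
  obtain ⟨i₀, hi₀, hxe⟩ := List.mem_iff_getElem.mp hx
  obtain ⟨y, hy, hd⟩ := hp i₀ hi₀
  have q : (xs.eraseIdx i₀).Perm (ys.eraseIdx i) := by
    have p1 : (xs.eraseIdx i₀).Perm (xs.erase xs[i₀]) := (List.erase_getElem hi₀).symm
    have p2 : (xs.erase xs[i₀]).Perm (ys.erase xs[i₀]) := h.erase _
    have p4 : (ys.erase ys[i]).Perm (ys.eraseIdx i) := List.erase_getElem hi
    rw [hxe] at p1 p2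
    exact (p1.trans p2).trans p4
  rw [hxe] at hd
  exact ⟨y, q.subset hy, hd⟩

theorem pidx_perm {xs ys : List Int} (h : xs.Perm ys) (d : Int) : PIdx xs d ↔ PIdx ys d :=
  ⟨pidx_of_perm h d, pidx_of_perm h.symm d⟩

theorem getElem_mono_of_pairwise {s : List Int} (hs : s.Pairwise (· ≤ ·)) {p q : Nat}
    (hpq : p ≤ q) (hq : q < s.length) : s[p]'(by omega) ≤ s[q]'hq := by
  rcases Nat.lt_or_ge p q with hlt | hge
  · exact List.pairwise_iff_getElem.mp hs p q (by omega) hq hlt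
  · have : p = q := by omega
    subst this
    exact le_refl _

theorem pidx_sorted (s : List Int) (d : Int) (hs : s.Pairwise (· ≤ ·)) :
    PIdx s d ↔ ∀ i, (hi : i < s.length) → (0 < i ∧ s[i]'hi - s[i-1]'(by omega) ≤ d) ∨
      (∃ h1 : i + 1 < s.length, s[i+1]'h1 - s[i]'hi ≤ d) := by
  constructor
  · intro h i hi
    obtain ⟨j, hj, hne, hd⟩ := h i hi
    by_cases hji : j < i
    · left
      refine ⟨by omega, ?_⟩
      have h1 : s[j] ≤ s[i-1]'(by omega) := getElem_mono_of_pairwise hs (by omega) (by omega)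
      have h2 : s[j] ≤ s[i] := getElem_mono_of_pairwise hs (by omega) hi
      rw [abs_of_nonneg (by omega)] at hd
      omega
    · right
      have hij : i < j := by omega
      refine ⟨by omega, ?_⟩
      have h1 : s[i+1]'(by omega) ≤ s[j] := getElem_mono_of_pairwise hs (by omega) hj
      have h2 : s[i] ≤ s[j] := getElem_mono_of_pairwise hs (by omega) hj
      rw [abs_of_nonpos (by omega)] at hd
      omega
  · intro h i hi
    rcases h i hi with ⟨hpos, hle⟩ | ⟨h1, hle⟩
    · refine ⟨i - 1, by omega, by omega, ?_⟩
      have h2 : s[i-1]'(by omega) ≤ s[i] := getElem_mono_of_pairwise hs (by omega) hi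
      rw [abs_of_nonneg (by omega)]
      omega
    · refine ⟨i + 1, h1, by omega, ?_⟩
      have h2 : s[i] ≤ s[i+1]'h1 := getElem_mono_of_pairwise hs (by omega) h1
      rw [abs_of_nonpos (by omega)]
      omega

theorem portB_iff (xs : List Int) (d : Int) :
    is_clustered_alt xs d = true ↔
      (∀ i, (hi : i < (PySem.List.sorted xs (fun x => x) false).length) →
        (0 < i ∧ (PySem.List.sorted xs (fun x => x) false)[i]'hi - (PySem.List.sorted xs (fun x => x) false)[i-1]'(by omega) ≤ d) ∨
        (∃ h1 : i + 1 < (PySem.List.sorted xs (fun x => x) false).length,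
          (PySem.List.sorted xs (fun x => x) false)[i+1]'h1 - (PySem.List.sorted xs (fun x => x) false)[i]'hi ≤ d)) := by
  have hlen : (PySem.List.sorted xs (fun x => x) false).length = xs.length :=
    PySem.List.length_sorted _ _ _
  unfold is_clustered_alt
  simp only []
  rw [PySem.List.pyRange_one]
  simp [List.all_eq_true]
  constructor
  · intro h k hk
    rcases h k (by omega) with ⟨hpos, hle⟩ | ⟨hlt, hle⟩
    · left
      refine ⟨hpos, ?_⟩
      rw [List.getElem?_eq_getElem (show k < (PySem.List.sorted xs (fun x => x) false).length by omega),
        show (k:Int) - 1 = ((k-1 : Nat) : Int) by omega,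
        pyGetD_nat _ _ (by omega)] at hle
      simpa using hle
    · right
      refine ⟨by omega, ?_⟩
      rw [List.getElem?_eq_getElem (show k < (PySem.List.sorted xs (fun x => x) false).length by omega),
        show (k:Int) + 1 = ((k+1 : Nat) : Int) by omega,
        pyGetD_nat _ _ (by omega)] at hle
      simpa using hle
  · intro h k hk
    rcases h k (by omega) with ⟨hpos, hle⟩ | ⟨hk1, hle⟩
    · left
      refine ⟨hpos, ?_⟩
      rw [List.getElem?_eq_getElem (show k < (PySem.List.sorted xs (fun x => x) false).length by omega),
        show (k:Int) - 1 = ((k-1 : Nat) : Int) by omega,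
        pyGetD_nat _ _ (by omega)]
      simpa using hle
    · right
      refine ⟨by omega, ?_⟩
      rw [List.getElem?_eq_getElem (show k < (PySem.List.sorted xs (fun x => x) false).length by omega),
        show (k:Int) + 1 = ((k+1 : Nat) : Int) by omega,
        pyGetD_nat _ _ (by omega)]
      simpa using hle

-- ===== VERDICT (by name: the statement is the Claim_ definition above) =====
theorem is_clustered_spec : Claim_equal_is_clustered := by
  intro xs d _
  unfold Spec_is_clustered
  have hperm : (PySem.List.sorted xs (fun x => x) false).Perm xs := PySem.List.sorted_perm xs _ _
  have hpw : (PySem.List.sorted xs (fun x => x) false).Pairwise (· ≤ ·) := by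
    simpa using PySem.List.sorted_pairwise xs (fun x => x)
  have : is_clustered xs d = true ↔ is_clustered_alt xs d = true := by
    rw [portA_iff, portB_iff, ← pidx_sorted _ _ hpw, pidx_perm hperm]
  cases hA : is_clustered xs d <;> cases hB : is_clustered_alt xs d <;> simp_all
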